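-- pv_equiv track=rewrite | github.com/Hulyamr13/hackerrank | certificates/4_1.py | missingCharacters
-- ===== SOURCE A (Python) =====
-- def missingCharacters(s):
--     l = [0] * 123
--     result = ""
--     i = 0
--     while i < len(s):
--         x = ord(s[i])
--         l[x] += 1
--         i += 1
--     j = 48
--     while j <= 57:
--         if l[j] == 0:
--             result += chr(j)
--         j += 1
--     k = 97
--     while k <= 122:
--         if l[k] == 0:
--             result += chr(k)
--         k += 1
--     return result
-- ===== SOURCE B (Python) =====
-- def missingCharacters(s):
--     universe = "0123456789abcdefghijklmnopqrstuvwxyz"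
--     present = set(s)
--     return "".join(sorted(set(universe) - present))
-- ===== Notes on version B (the rewrite author's own statement) =====
-- stated objective: simpler
-- what changed: Replaces the 123-slot count array and the two ordered range scans with a set difference (allowed characters minus characters present) followed by a sort-and-join; ASCII sorts digits before lowercase letters, so the order matches; the per-character Python loop becomes C-level set construction.
import Mathlib
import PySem

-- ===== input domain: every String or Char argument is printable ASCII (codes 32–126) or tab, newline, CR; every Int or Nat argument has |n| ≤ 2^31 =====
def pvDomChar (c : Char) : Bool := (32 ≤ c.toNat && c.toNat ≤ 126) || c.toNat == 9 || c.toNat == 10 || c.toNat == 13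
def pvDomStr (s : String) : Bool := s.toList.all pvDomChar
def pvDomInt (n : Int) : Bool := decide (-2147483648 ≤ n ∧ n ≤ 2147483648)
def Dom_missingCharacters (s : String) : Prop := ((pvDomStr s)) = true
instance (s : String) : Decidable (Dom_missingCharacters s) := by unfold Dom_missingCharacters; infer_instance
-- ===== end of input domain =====

-- B replaces A's 123-slot count array and two ordered range scans by a set
-- difference (allowed characters minus characters present) followed by a sort (objective: simpler).

-- ===== PORT A =====
def missingCharacters (s : String) : String :=
  let l : List Int := s.toList.foldl
    (fun l c => PySem.List.pySetD l (c.toNat : Int) (PySem.List.pyGetD l (c.toNat : Int) 0 + 1))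
    (List.replicate 123 0)
  let result : List Char :=
    (PySem.List.pyRange 48 58 1).foldl
      (fun r j => if PySem.List.pyGetD l j 0 = 0 then r ++ [Char.ofNat j.toNat] else r) []
  let result :=
    (PySem.List.pyRange 97 123 1).foldl
      (fun r k => if PySem.List.pyGetD l k 0 = 0 then r ++ [Char.ofNat k.toNat] else r) result
  String.ofList result

-- ===== PORT B =====
def missingCharacters_alt (s : String) : String :=
  let allowed : List Char := "0123456789abcdefghijklmnopqrstuvwxyz".toList
  let present : PySem.Set Char := PySem.Set.ofList s.toList
  String.ofList
    (PySem.List.sorted (PySem.Set.diff (PySem.Set.ofList allowed) present) (fun c => c) false)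

-- ===== PRECONDITION & SPEC =====
-- Pre_ excludes exactly the strings on which A raises IndexError (a character with code > 122).
def Pre_missingCharacters (s : String) : Prop :=
  s.toList.all (fun c => c.toNat ≤ 122) = true
instance (s : String) : Decidable (Pre_missingCharacters s) := by
  unfold Pre_missingCharacters; infer_instance
def pvWitness_missingCharacters : String := "abc123"

def Spec_missingCharacters (s : String) (out : String) : Prop := out = missingCharacters_alt s
instance (s : String) (out : String) : Decidable (Spec_missingCharacters s out) := by
  unfold Spec_missingCharacters; infer_instance

-- ===== CLAIM (what is proved, stated in full; the proofs are below) =====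
def Claim_equal_missingCharacters : Prop :=
  ∀ (s : String), Dom_missingCharacters s → Pre_missingCharacters s →
    Spec_missingCharacters s (missingCharacters s)

-- ===== LEMMAS AND PROOFS =====

def allowedChars : List Char := "0123456789abcdefghijklmnopqrstuvwxyz".toList

-- the counting loop: slot j holds (initial value) + number of characters with code j
lemma count_fold (cs : List Char) (hcs : ∀ c ∈ cs, c.toNat ≤ 122) :
    ∀ (l : List Int), l.length = 123 → ∀ j : Nat, j < 123 →
    PySem.List.pyGetD
      (cs.foldl (fun l c => PySem.List.pySetD l (c.toNat : Int)
                   (PySem.List.pyGetD l (c.toNat : Int) 0 + 1)) l)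
      (j : Int) 0
      = PySem.List.pyGetD l (j : Int) 0 + (cs.countP (fun c => c.toNat = j) : Int) := by
  induction cs with
  | nil => intro l _ j _; simp
  | cons c cs ih =>
    intro l hl j hj
    have hc : c.toNat ≤ 122 := hcs c (List.mem_cons_self)
    have hlen : c.toNat < l.length := by omega
    simp only [List.foldl_cons]
    rw [ih (fun d hd => hcs d (List.mem_cons_of_mem _ hd))
        _ (by rw [PySem.List.length_pySetD]; exact hl) j hj]
    rw [PySem.List.pyGetD_pySetD_natCast _ _ _ _ _ hlen]
    by_cases h : c.toNat = j
    · subst h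
      rw [if_pos rfl, List.countP_cons]
      simp
      ring
    · rw [if_neg (fun e => h e.symm), List.countP_cons]
      simp [h]

lemma countP_zero_iff (cs : List Char) (j : Nat) (hj : j < 123) :
    cs.countP (fun c => c.toNat = j) = 0 ↔ Char.ofNat j ∉ cs := by
  rw [List.countP_eq_zero]
  constructor
  · intro h hm
    have := h _ hm
    simp only [decide_eq_true_eq] at this
    exact this (by rw [Char.toNat_ofNat, if_pos (Or.inl (by omega))])
  · intro h c hc
    simp only [decide_eq_true_eq]
    intro hcj
    have hce : Char.ofNat j = c := by rw [← hcj]; exact Char.ofNat_toNat c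
    exact h (hce ▸ hc)

lemma fold_if_to_filter (p : Int → Prop) [DecidablePred p] (q : Int → Bool)
    (L : List Int) (init : List Char) (h : ∀ j ∈ L, p j ↔ q j = true) :
    L.foldl (fun r j => if p j then r ++ [Char.ofNat j.toNat] else r) init
      = init ++ (L.filter q).map (fun j => Char.ofNat j.toNat) := by
  rw [← PySem.List.foldl_append_if q (fun j : Int => Char.ofNat j.toNat)]
  refine PySem.List.foldl_congr_mem' _ _ _ _ ?_
  · intro j hj acc
    by_cases hq : q j = true
    · rw [if_pos ((h j hj).mpr hq), if_pos hq]
    · rw [if_neg (fun hp => hq ((h j hj).mp hp)), if_neg hq]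

lemma A_eq_filter (s : String) (hpre : Pre_missingCharacters s) :
    missingCharacters s
      = String.ofList (allowedChars.filter (fun c => !(decide (c ∈ s.toList)))) := by
  unfold Pre_missingCharacters at hpre
  rw [List.all_eq_true] at hpre
  have hcs : ∀ c ∈ s.toList, c.toNat ≤ 122 := by
    intro c hc; have := hpre c hc; simpa using this
  unfold missingCharacters
  simp only
  rw [show PySem.List.pyRange 48 58 1 = ([48,49,50,51,52,53,54,55,56,57] : List Int) from by decide,
      show PySem.List.pyRange 97 123 1 =
        ([97,98,99,100,101,102,103,104,105,106,107,108,109,110,111,112,113,114,115,116,117,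
          118,119,120,121,122] : List Int) from by decide,
      ← List.foldl_append]
  rw [fold_if_to_filter _ (fun j => !(decide (Char.ofNat j.toNat ∈ s.toList))) _ _ ?_]
  · rw [List.nil_append,
        show allowedChars
          = (([48,49,50,51,52,53,54,55,56,57] ++
              [97,98,99,100,101,102,103,104,105,106,107,108,109,110,111,112,113,114,115,116,
               117,118,119,120,121,122] : List Int).map (fun j => Char.ofNat j.toNat))
          from by decide,
        List.filter_map]
    rfl
  · intro j hj
    have hb : 48 ≤ j ∧ j < 123 := by fin_cases hj <;> omega
    obtain ⟨n, rfl⟩ : ∃ n : Nat, j = (n : Int) := ⟨j.toNat, by omega⟩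
    have hn : n < 123 := by omega
    rw [count_fold s.toList hcs _ (by simp) n hn]
    have h0 : PySem.List.pyGetD (List.replicate 123 (0 : Int)) (n : Int) 0 = 0 := by
      rw [PySem.List.pyGetD_natCast,
          List.getD_eq_getElem _ _ (by simpa using hn), List.getElem_replicate]
    rw [h0, zero_add]
    simp only [Int.toNat_natCast, Bool.not_eq_true', decide_eq_false_iff_not, Nat.cast_eq_zero]
    exact countP_zero_iff s.toList n hn

lemma B_eq_filter (s : String) :
    missingCharacters_alt s
      = String.ofList (allowedChars.filter (fun c => !(decide (c ∈ s.toList)))) := by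
  unfold missingCharacters_alt
  simp only
  congr 1
  apply PySem.List.sorted_eq_of_perm_of_pairwise_lt
  · apply (List.perm_ext_iff_of_nodup ?_ ?_).mpr
    · intro c
      rw [List.mem_filter, PySem.Set.mem_diff, PySem.Set.mem_ofList, PySem.Set.mem_ofList]
      simp [allowedChars]
    · exact List.Nodup.filter _ (by decide)
    · exact PySem.Set.nodup_diff _ _ (PySem.Set.nodup_ofList _)
  · have hall : allowedChars.Pairwise (· < ·) := by decide
    exact List.Pairwise.sublist List.filter_sublist hall

theorem missingCharacters_spec : Claim_equal_missingCharacters := by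
  intro s _ hpre
  unfold Spec_missingCharacters
  rw [A_eq_filter s hpre, B_eq_filter s]
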